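-- pv_equiv track=rewrite | github.com/oskkos/AOC2023 | src/day11.py | get_dot_rows_and_cols
-- ===== SOURCE A (Python) =====
-- def get_dot_rows_and_cols(lines: list[str]) -> tuple[list[int], list[int]]:
--     """
--     Gets the rows and columns that contain only dots.
--
--     Args:
--         lines (list[str]): The lines to check.
--
--     Returns:
--         tuple[list[int], list[int]]: A tuple containing the rows and columns that contain
--                                      only dots.
--     """
--     dot_rows = []
--     for i, line in enumerate(lines):
--         if all(char == "." for char in line):
--             dot_rows.append(i)
--
--     dot_cols = []
--     cols_length = len(lines[0])
--     for i in range(cols_length):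
--         if all(line[i] == "." for line in lines):
--             dot_cols.append(i)
--     return dot_rows, dot_cols
-- ===== SOURCE B (Python) =====
-- def get_dot_rows_and_cols(lines: list[str]) -> tuple[list[int], list[int]]:
--     dot_rows = [i for i, line in enumerate(lines) if all(ch == "." for ch in line)]
--     width = len(lines[0])
--     ok = [True] * width
--     for line in lines:
--         for j in range(width):
--             if ok[j] and line[j] != ".":
--                 ok[j] = False
--     dot_cols = [j for j in range(width) if ok[j]]
--     return dot_rows, dot_cols
-- ===== Notes on version B (the rewrite author's own statement) =====
-- stated objective: alternative
-- what changed: Columns are computed in a single row-major pass that maintains a per-column boolean table (skipping columns already known non-dot) instead of re-scanning all lines once per column; rows become a comprehension.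
import Mathlib
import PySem

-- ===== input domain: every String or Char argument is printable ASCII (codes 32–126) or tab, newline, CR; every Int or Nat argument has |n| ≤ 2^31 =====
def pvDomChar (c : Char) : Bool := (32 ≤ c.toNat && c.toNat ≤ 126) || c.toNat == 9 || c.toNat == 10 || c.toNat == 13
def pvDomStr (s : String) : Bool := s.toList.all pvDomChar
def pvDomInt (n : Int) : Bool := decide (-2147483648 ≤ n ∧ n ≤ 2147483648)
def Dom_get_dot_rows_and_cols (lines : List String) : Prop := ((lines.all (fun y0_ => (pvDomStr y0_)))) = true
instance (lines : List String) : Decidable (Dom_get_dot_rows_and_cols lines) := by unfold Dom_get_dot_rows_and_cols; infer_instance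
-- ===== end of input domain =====

-- B computes the dot-columns in one row-major pass over a per-column boolean table (skipping already-dead columns) instead of re-scanning all lines once per column (alternative decomposition, same cost).


-- ===== PORT A =====
def get_dot_rows_and_cols (lines : List String) : List Int × List Int :=
  let dot_rows := (PySem.List.enumerate lines).foldl
    (fun acc p => if p.2.toList.all (fun c => c == '.') then acc ++ [p.1] else acc) []
  let cols_length : Int := PySem.Str.len ((PySem.List.pyGet? lines 0).getD "")  -- len(lines[0]); [] excluded by Pre_
  let dot_cols := (PySem.List.pyRange 0 cols_length 1).foldl
    (fun acc i => if lines.all (fun line => PySem.Str.pyGet? line i == some '.') then acc ++ [i] else acc) []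
  (dot_rows, dot_cols)

-- ===== PORT B =====
-- loop body 'if ok[j] and line[j] != ".": ok[j] = False' (Python's IndexError on line[j] is excluded by Pre_)
def pvColStep (line : String) (ok : List Bool) (j : Int) : List Bool :=
  if ((PySem.List.pyGet? ok j).getD false) && !(PySem.Str.pyGet? line j == some '.') then
    ok.set j.toNat false
  else ok

def get_dot_rows_and_cols_alt (lines : List String) : List Int × List Int :=
  let dot_rows := ((PySem.List.enumerate lines).filter
      (fun p => p.2.toList.all (fun c => c == '.'))).map (fun p => p.1)
  let width : Int := PySem.Str.len ((PySem.List.pyGet? lines 0).getD "")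
  let ok := lines.foldl
      (fun ok line => (PySem.List.pyRange 0 width 1).foldl (pvColStep line) ok)
      (List.replicate width.toNat true)
  let dot_cols := (PySem.List.pyRange 0 width 1).filter
      (fun j => (PySem.List.pyGet? ok j).getD false)
  (dot_rows, dot_cols)

-- ===== PRECONDITION & SPEC =====
-- Pre_ is exactly the set of inputs on which the Python A returns normally: the grid is nonempty, and
-- every line that is too short at an in-grid column position is preceded by a line carrying a
-- non-dot at that position (otherwise the column scan reaches the short line and raises IndexError).
def Pre_get_dot_rows_and_cols (lines : List String) : Prop :=
  lines ≠ [] ∧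
  ∀ i < (lines.headD "").toList.length, ∀ k < lines.length,
    (lines.getD k "").toList.length ≤ i →
      ∃ k' < k, i < (lines.getD k' "").toList.length ∧ (lines.getD k' "").toList.getD i ' ' ≠ '.'
instance (lines : List String) : Decidable (Pre_get_dot_rows_and_cols lines) := by
  unfold Pre_get_dot_rows_and_cols; infer_instance
def pvWitness_get_dot_rows_and_cols : List String := ["..", ".#"]

def Spec_get_dot_rows_and_cols (lines : List String) (out : List Int × List Int) : Prop := out = get_dot_rows_and_cols_alt lines
instance (lines : List String) (out : List Int × List Int) : Decidable (Spec_get_dot_rows_and_cols lines out) := by unfold Spec_get_dot_rows_and_cols; infer_instance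

-- ===== CLAIM (what is proved, stated in full; the proofs are below) =====
def Claim_equal_get_dot_rows_and_cols : Prop := ∀ (lines : List String), Dom_get_dot_rows_and_cols lines → Pre_get_dot_rows_and_cols lines → Spec_get_dot_rows_and_cols lines (get_dot_rows_and_cols lines)

-- ===== LEMMAS AND PROOFS =====

theorem pvColStep_getElem?_ne (line : String) (ok : List Bool) (j : Int) (n : Nat)
    (h : j ≠ (n : Int)) (h0 : 0 ≤ j) : (pvColStep line ok j)[n]? = ok[n]? := by
  unfold pvColStep
  split
  · rw [List.getElem?_set_ne (by omega)]
  · rfl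

theorem pvColStep_getElem?_self (line : String) (ok : List Bool) (j : Int) (h0 : 0 ≤ j) :
    (pvColStep line ok j)[j.toNat]? =
      (ok[j.toNat]?).map (fun b => b && (PySem.Str.pyGet? line j == some '.')) := by
  unfold pvColStep
  rw [PySem.List.pyGet?_of_nonneg _ h0]
  cases h : ok[j.toNat]? with
  | none =>
    have hge : ok.length ≤ j.toNat := by
      by_contra hn; rw [List.getElem?_eq_getElem (by omega)] at h; cases h
    rw [if_neg (by simp)]
    simp [List.getElem?_eq_none hge]
  | some b =>
    have hlt : j.toNat < ok.length := by
      by_contra hn; rw [List.getElem?_eq_none (by omega)] at h; cases h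
    cases b with
    | false => simp [h]
    | true =>
      by_cases hq : PySem.List.pyGet? line.toList j = some '.'
      · rw [if_neg (by simp [hq]), h, Option.map_some]
        simp [hq]
      · rw [if_pos (by simp [hq]), List.getElem?_set_self hlt, Option.map_some]
        simp [hq]

-- one line's pass over columns a..W-1, seen at column n
theorem pvColPass_getElem? (line : String) (W : Int) (a : Int) (ok : List Bool) (n : Nat)
    (h0 : 0 ≤ a) :
    ((PySem.List.pyRange a W 1).foldl (pvColStep line) ok)[n]? =
      if a ≤ (n : Int) ∧ (n : Int) < W then
        (ok[n]?).map (fun b => b && (PySem.Str.pyGet? line (n : Int) == some '.'))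
      else ok[n]? := by
  by_cases hlt : a < W
  · rw [PySem.List.pyRange_one_cons hlt, List.foldl_cons]
    rw [pvColPass_getElem? line W (a + 1) (pvColStep line ok a) n (by omega)]
    by_cases he : a = (n : Int)
    · rw [if_neg (by omega), if_pos (by omega)]
      have hs := pvColStep_getElem?_self line ok a h0
      have ht : a.toNat = n := by omega
      rw [ht] at hs
      rw [hs, he]
    · rw [pvColStep_getElem?_ne line ok a n he h0]
      by_cases hc : a + 1 ≤ (n : Int) ∧ (n : Int) < W
      · rw [if_pos hc, if_pos (by omega)]
      · rw [if_neg hc]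
        by_cases hc2 : a ≤ (n : Int) ∧ (n : Int) < W
        · exact absurd ⟨by omega, hc2.2⟩ hc
        · rw [if_neg hc2]
  · rw [PySem.List.pyRange_one_eq_nil (by omega), List.foldl_nil, if_neg (by omega)]
termination_by (W - a).toNat
decreasing_by omega

-- the whole row-major fold, seen at column n
theorem pv_fold_getElem? (W : Int) (lines : List String) :
    ∀ (ok : List Bool) (n : Nat), (n : Int) < W →
    (lines.foldl (fun ok line => (PySem.List.pyRange 0 W 1).foldl (pvColStep line) ok) ok)[n]? =
      (ok[n]?).map (fun b => b && lines.all (fun l => PySem.Str.pyGet? l (n : Int) == some '.')) := by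
  induction lines with
  | nil =>
    intro ok n _
    cases h : ok[n]? <;> simp [h]
  | cons l ls ih =>
    intro ok n hn
    simp only [List.foldl_cons]
    rw [ih _ n hn]
    rw [pvColPass_getElem? l W 0 _ n le_rfl, if_pos ⟨by omega, hn⟩]
    cases h : ok[n]? with
    | none => simp
    | some b => simp [List.all_cons, Bool.and_assoc]

-- ===== VERDICT (by name: the statement is the Claim_ definition above) =====
theorem get_dot_rows_and_cols_spec : Claim_equal_get_dot_rows_and_cols := by
  intro lines _ _
  unfold Spec_get_dot_rows_and_cols get_dot_rows_and_cols get_dot_rows_and_cols_alt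
  refine Prod.ext ?_ ?_
  · -- rows
    simp only [PySem.List.foldl_append_if, List.nil_append]
  · -- cols
    set W : Int := PySem.Str.len ((PySem.List.pyGet? lines 0).getD "") with hWdef
    have hW0 : 0 ≤ W := by
      simp only [hWdef, PySem.Str.len]; positivity
    simp only [PySem.List.foldl_append_if_eq_filter, List.nil_append]
    apply List.filter_congr
    intro i hi
    rw [PySem.List.mem_pyRange_one] at hi
    have hnat : ((i.toNat : Nat) : Int) = i := by omega
    rw [PySem.List.pyGet?_of_nonneg _ hi.1]
    rw [pv_fold_getElem? W lines _ i.toNat (by omega)]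
    rw [List.getElem?_replicate, if_pos (by omega)]
    simp only [Option.map_some, Option.getD_some, Bool.true_and]
    congr 1
    funext line
    rw [hnat]
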